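-- pv_equiv track=rewrite | github.com/cosinusalpha/webctl | src/webctl/daemon/adblock/scriptlets.py | _domain_matches
-- ===== SOURCE A (Python) =====
-- def _get_hostname_variants(hostname: str) -> list[str]:
--     """Get all variants of a hostname for matching."""
--     parts = hostname.split(".")
--     variants = []
--     for i in range(len(parts)):
--         variants.append(".".join(parts[i:]))
--     return variants
--
-- def _domain_matches(
--     hostname: str, included: set[str], excluded: set[str]
-- ) -> bool:
--     """Check if hostname matches domain constraints."""
--     hostname = hostname.lower()
--     hostname_variants = _get_hostname_variants(hostname)
--
--     # Check exclusions first
--     for variant in hostname_variants: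
--         if variant in excluded:
--             return False
--
--     # If no inclusions specified, doesn't match (scriptlets are domain-specific)
--     if not included:
--         return False
--
--     # Check inclusions
--     return any(variant in included for variant in hostname_variants)
-- ===== SOURCE B (Python) =====
-- def _domain_matches(
--     hostname: str, included: set[str], excluded: set[str]
-- ) -> bool:
--     """Check if hostname matches domain constraints."""
--     hostname = hostname.lower()
--
--     def _hits(domains):
--         return any(hostname == d or hostname.endswith("." + d) for d in domains)
--
--     return (not _hits(excluded)) and bool(included) and _hits(included)
-- ===== Notes on version B (the rewrite author's own statement) =====
-- stated objective: idiomatic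
-- what changed: Instead of materializing every dot-suffix variant of the hostname and probing the sets, B scans each rule set once and tests 'hostname == d or hostname.endswith("." + d)' per rule, returning a single boolean expression.
import Mathlib
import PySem

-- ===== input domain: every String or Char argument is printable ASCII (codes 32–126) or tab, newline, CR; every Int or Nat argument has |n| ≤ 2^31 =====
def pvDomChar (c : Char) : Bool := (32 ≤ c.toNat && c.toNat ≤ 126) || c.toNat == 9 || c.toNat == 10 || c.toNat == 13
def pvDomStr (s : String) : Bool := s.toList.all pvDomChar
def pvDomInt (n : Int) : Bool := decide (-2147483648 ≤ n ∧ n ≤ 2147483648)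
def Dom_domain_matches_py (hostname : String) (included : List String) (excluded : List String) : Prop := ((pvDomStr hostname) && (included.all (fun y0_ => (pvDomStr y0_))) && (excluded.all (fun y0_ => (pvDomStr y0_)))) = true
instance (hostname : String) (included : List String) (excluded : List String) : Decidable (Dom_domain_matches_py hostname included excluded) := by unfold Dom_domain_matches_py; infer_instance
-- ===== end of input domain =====

-- B replaces A's suffix-variant materialization by a direct per-rule suffix test over each set (idiomatic, one boolean expression).


-- ===== PORT A =====
-- parts = hostname.split("."); split? is `some` here since the separator "." is non-empty, so `.getD []` never fires
def get_hostname_variants (hostname : String) : List String :=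
  let parts := (PySem.Str.split? hostname ".").getD []
  (PySem.List.pyRange 0 parts.length 1).foldl
    (fun variants i => variants ++ [PySem.Str.join "." (PySem.List.slice parts (some i) none)]) []

def domain_matches_py (hostname : String) (included : List String) (excluded : List String) : Bool :=
  let hostname' := PySem.Str.lower hostname
  let hostname_variants := get_hostname_variants hostname'
  -- 'for variant …: if variant in excluded: return False' = any over the variants
  if hostname_variants.any (fun v => PySem.Set.contains excluded v) then false
  else if included.isEmpty then false
  else hostname_variants.any (fun v => PySem.Set.contains included v)

-- ===== PORT B =====
-- any(hostname == d or hostname.endswith("." + d) for d in domains)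
def pvHits (hostname : String) (domains : List String) : Bool :=
  domains.any (fun d => hostname == d || PySem.Str.endswith hostname ("." ++ d))

def domain_matches_py_alt (hostname : String) (included : List String) (excluded : List String) : Bool :=
  let hostname' := PySem.Str.lower hostname
  !(pvHits hostname' excluded) && !included.isEmpty && pvHits hostname' included

-- ===== PRECONDITION & SPEC =====
def Spec_domain_matches_py (hostname : String) (included : List String) (excluded : List String) (out : Bool) : Prop := out = domain_matches_py_alt hostname included excluded
instance (hostname : String) (included : List String) (excluded : List String) (out : Bool) : Decidable (Spec_domain_matches_py hostname included excluded out) := by unfold Spec_domain_matches_py; infer_instance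

-- ===== CLAIM (what is proved, stated in full; the proofs are below) =====
def Claim_equal_domain_matches_py : Prop := ∀ (hostname : String) (included : List String) (excluded : List String), Dom_domain_matches_py hostname included excluded → Spec_domain_matches_py hostname included excluded (domain_matches_py hostname included excluded)

-- ===== LEMMAS AND PROOFS =====

-- A simple accumulator-free form of splitting on '.'
def pvSplit1 : List Char → List (List Char)
  | [] => [[]]
  | c :: rest =>
    if c = '.' then [] :: pvSplit1 rest
    else match pvSplit1 rest with
      | [] => [[c]]
      | p :: ps => (c :: p) :: ps

theorem pvSplit1_ne_nil (s : List Char) : pvSplit1 s ≠ [] := by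
  cases s with
  | nil => simp [pvSplit1]
  | cons c rest =>
    simp only [pvSplit1]
    split
    · simp
    · split <;> simp_all

theorem splitOn_go_eq (fuel : Nat) : ∀ (l cur : List Char) (acc : List (List Char)), l.length < fuel →
    PySem.Chars.splitOn.go ['.'] fuel l cur acc =
      acc.reverse ++ (match pvSplit1 l with
        | [] => []
        | p :: ps => (cur.reverse ++ p) :: ps) := by
  induction fuel with
  | zero => intro l cur acc h; exact absurd h (Nat.not_lt_zero _)
  | succ fuel ih =>
    intro l cur acc h
    cases l with
    | nil => simp [PySem.Chars.splitOn.go, pvSplit1]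
    | cons c rest =>
      by_cases hc : c = '.'
      · subst hc
        rw [show PySem.Chars.splitOn.go ['.'] (fuel+1) ('.' :: rest) cur acc =
              PySem.Chars.splitOn.go ['.'] fuel rest [] (cur.reverse :: acc) from by
          simp [PySem.Chars.splitOn.go, List.isPrefixOf]]
        rw [ih rest [] (cur.reverse :: acc) (by simpa using Nat.lt_of_succ_lt_succ h)]
        have := pvSplit1_ne_nil rest
        cases hs : pvSplit1 rest with
        | nil => exact absurd hs this
        | cons p ps => simp [pvSplit1, hs]
      · rw [show PySem.Chars.splitOn.go ['.'] (fuel+1) (c :: rest) cur acc =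
              PySem.Chars.splitOn.go ['.'] fuel rest (c :: cur) acc from by
          simp [PySem.Chars.splitOn.go, List.isPrefixOf]
          exact fun h' => absurd h'.symm hc]
        rw [ih rest (c :: cur) acc (by simpa using Nat.lt_of_succ_lt_succ h)]
        have := pvSplit1_ne_nil rest
        cases hs : pvSplit1 rest with
        | nil => exact absurd hs this
        | cons p ps => simp [pvSplit1, hc, hs]

theorem splitOn_dot (s : List Char) : PySem.Chars.splitOn s ['.'] = pvSplit1 s := by
  have h := splitOn_go_eq (s.length + 1) s [] [] (Nat.lt_succ_self _)
  rw [PySem.Chars.splitOn] at *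
  rw [h]
  have := pvSplit1_ne_nil s
  cases hs : pvSplit1 s with
  | nil => exact absurd hs this
  | cons p ps => simp

theorem intercalate_cons_cons_dot (a b : List Char) (l : List (List Char)) :
    List.intercalate ['.'] (a :: b :: l) = a ++ '.' :: List.intercalate ['.'] (b :: l) := by
  simp [List.intercalate, List.intersperse]

theorem join_pvSplit1 (s : List Char) : List.intercalate ['.'] (pvSplit1 s) = s := by
  induction s with
  | nil => simp [pvSplit1, List.intercalate]
  | cons c rest ih =>
    by_cases hc : c = '.'
    · subst hc
      have := pvSplit1_ne_nil rest
      cases hs : pvSplit1 rest with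
      | nil => exact absurd hs this
      | cons p ps =>
        rw [hs] at ih
        have hps : pvSplit1 ('.' :: rest) = [] :: p :: ps := by simp [pvSplit1, hs]
        rw [hps, intercalate_cons_cons_dot, ih]
        rfl
    · have hne := pvSplit1_ne_nil rest
      cases hs : pvSplit1 rest with
      | nil => exact absurd hs hne
      | cons p ps =>
        rw [hs] at ih
        cases ps with
        | nil =>
          simp only [pvSplit1, if_neg hc, hs]
          simp [List.intercalate] at ih ⊢
          simp [ih]
        | cons p' ps' =>
          simp only [pvSplit1, if_neg hc, hs, intercalate_cons_cons_dot] at ih ⊢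
          simp [ih]

theorem pvSplit1_append (t d : List Char) : pvSplit1 (t ++ '.' :: d) = pvSplit1 t ++ pvSplit1 d := by
  induction t with
  | nil => simp [pvSplit1]
  | cons c t' ih =>
    by_cases hc : c = '.'
    · simp [pvSplit1, hc, ih]
    · have := pvSplit1_ne_nil t'
      cases hs : pvSplit1 t' with
      | nil => exact absurd hs this
      | cons p ps => simp [pvSplit1, hc, ih, hs]

theorem intercalate_append_ne (ps qs : List (List Char)) (hp : ps ≠ []) (hq : qs ≠ []) :
    List.intercalate ['.'] (ps ++ qs) =
      List.intercalate ['.'] ps ++ '.' :: List.intercalate ['.'] qs := by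
  induction ps with
  | nil => exact absurd rfl hp
  | cons p ps' ih =>
    cases ps' with
    | nil =>
      cases qs with
      | nil => exact absurd rfl hq
      | cons q qs' => simp [List.intercalate]
    | cons p' ps'' =>
      have h := ih (by simp)
      simp [List.intercalate] at *
      simpa using h

-- the characterization: d is a variant of s iff d = s or '.'++d is a suffix of s
theorem mem_variants_iff (s d : List Char) :
    (d ∈ (List.range (pvSplit1 s).length).map
        (fun i => List.intercalate ['.'] ((pvSplit1 s).drop i))) ↔
      (d = s ∨ ('.' :: d) <:+ s) := by
  constructor
  · rintro hm
    simp only [List.mem_map, List.mem_range] at hm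
    obtain ⟨i, hi, hd⟩ := hm
    cases i with
    | zero => left; rw [← hd]; simpa using join_pvSplit1 s
    | succ i' =>
      right
      have htake : (pvSplit1 s).take (i'+1) ≠ [] := by
        intro h
        rcases List.take_eq_nil_iff.mp h with h0 | h0
        · omega
        · exact pvSplit1_ne_nil s h0
      have hdrop : (pvSplit1 s).drop (i'+1) ≠ [] := by
        intro h
        have := List.drop_eq_nil_iff.mp h
        omega
      have hsplit : pvSplit1 s = (pvSplit1 s).take (i'+1) ++ (pvSplit1 s).drop (i'+1) :=
        (List.take_append_drop _ _).symm
      have hjoin := join_pvSplit1 s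
      rw [hsplit] at hjoin
      rw [intercalate_append_ne _ _ htake hdrop] at hjoin
      rw [hd] at hjoin
      exact ⟨_, hjoin⟩
  · rintro (rfl | ⟨t, ht⟩)
    · simp only [List.mem_map, List.mem_range]
      exact ⟨0, by have := pvSplit1_ne_nil d; cases h : pvSplit1 d <;> simp_all,
        by simpa using join_pvSplit1 d⟩
    · simp only [List.mem_map, List.mem_range]
      refine ⟨(pvSplit1 t).length, ?_, ?_⟩
      · rw [← ht, pvSplit1_append]
        have hne : (pvSplit1 d).length ≠ 0 := by
          intro h0; exact pvSplit1_ne_nil d (List.length_eq_zero_iff.mp h0)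
        simp; omega
      · rw [← ht, pvSplit1_append, List.drop_append_of_le_length (le_refl _)]
        simp [join_pvSplit1]

-- variants of A, in map-over-drop form
theorem flatMap_singleton_map {A B : Type} (f : A → B) (l : List A) :
    List.flatMap (fun a => [f a]) l = l.map f := by
  induction l with
  | nil => rfl
  | cons x xs ih => simp [List.flatMap_cons, ih]

theorem split?_dot (h : String) :
    PySem.Str.split? h "." = some ((pvSplit1 h.toList).map String.ofList) := by
  have hb := PySem.Str.split?_map h "."
  rw [show ("." : String).toList = ['.'] from rfl] at hb
  rw [show PySem.Chars.split? h.toList ['.'] = some (PySem.Chars.splitOn h.toList ['.']) from by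
    simp [PySem.Chars.split?]] at hb
  rw [splitOn_dot] at hb
  cases hsp : PySem.Str.split? h "." with
  | none => rw [hsp] at hb; simp at hb
  | some L =>
    rw [hsp] at hb
    simp only [Option.map_some, Option.some.injEq] at hb
    congr 1
    rw [← hb, List.map_map,
      List.map_congr_left (fun a _ => show (String.ofList ∘ String.toList) a = id a from String.ofList_toList),
      List.map_id]

theorem variants_eq (h : String) :
    get_hostname_variants h =
      (List.range (pvSplit1 h.toList).length).map
        (fun i => String.ofList (List.intercalate ['.'] ((pvSplit1 h.toList).drop i))) := by
  unfold get_hostname_variants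
  rw [split?_dot]
  simp only [Option.getD_some, PySem.List.foldl_append_eq_flatMap, List.nil_append,
    PySem.List.pyRange_one, List.flatMap_map, List.length_map]
  rw [flatMap_singleton_map]
  have hn : ((((pvSplit1 h.toList).length : Int)) - 0).toNat = (pvSplit1 h.toList).length := by omega
  rw [hn]
  apply List.map_congr_left
  intro k hk
  rw [PySem.List.slice_from _ (by positivity)]
  have ht : ((0 : Int) + (k : Int)).toNat = k := by omega
  rw [ht, ← List.map_drop]
  apply String.toList_inj.mp
  rw [PySem.Str.toList_join, String.toList_ofList, List.map_map,
    List.map_congr_left (fun a _ => show (String.toList ∘ String.ofList) a = id a from String.toList_ofList),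
    List.map_id, String.toList_ofList]
  rfl

-- per-set agreement between A's probe and B's scan
theorem mem_variants_str (h : String) (v : String) :
    v ∈ get_hostname_variants h ↔ (v = h ∨ ('.' :: v.toList) <:+ h.toList) := by
  rw [variants_eq]
  constructor
  · intro hv
    simp only [List.mem_map, List.mem_range] at hv
    obtain ⟨i, hi, hvi⟩ := hv
    have hmem : v.toList ∈ (List.range (pvSplit1 h.toList).length).map
        (fun i => List.intercalate ['.'] ((pvSplit1 h.toList).drop i)) := by
      simp only [List.mem_map, List.mem_range]
      exact ⟨i, hi, by rw [← hvi, String.toList_ofList]⟩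
    rcases (mem_variants_iff h.toList v.toList).mp hmem with he | hsuf
    · exact Or.inl (String.toList_inj.mp he)
    · exact Or.inr hsuf
  · intro hv
    have hmem : v.toList ∈ (List.range (pvSplit1 h.toList).length).map
        (fun i => List.intercalate ['.'] ((pvSplit1 h.toList).drop i)) := by
      apply (mem_variants_iff h.toList v.toList).mpr
      rcases hv with rfl | hsuf
      · exact Or.inl rfl
      · exact Or.inr hsuf
    simp only [List.mem_map, List.mem_range] at hmem ⊢
    obtain ⟨i, hi, hvi⟩ := hmem
    exact ⟨i, hi, by rw [hvi, String.ofList_toList]⟩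

theorem any_variants_eq (h : String) (S : List String) :
    (get_hostname_variants h).any (fun v => PySem.Set.contains S v) =
      S.any (fun d => h == d || PySem.Str.endswith h ("." ++ d)) := by
  rw [Bool.eq_iff_iff]
  simp only [List.any_eq_true, PySem.Set.contains_iff, Bool.or_eq_true, beq_iff_eq,
    PySem.Str.endswith_eq, PySem.Chars.endswith_iff]
  constructor
  · rintro ⟨v, hv, hvS⟩
    rcases (mem_variants_str h v).mp hv with rfl | hsuf
    · exact ⟨v, hvS, Or.inl rfl⟩
    · exact ⟨v, hvS, Or.inr (by simpa using hsuf)⟩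
  · rintro ⟨d, hdS, hd | hsuf⟩
    · exact ⟨d, (mem_variants_str h d).mpr (Or.inl hd.symm), hdS⟩
    · exact ⟨d, (mem_variants_str h d).mpr (Or.inr (by simpa using hsuf)), hdS⟩

-- ===== VERDICT (by name: the statement is the Claim_ definition above) =====
theorem ite_eq_and (E I Inc : Bool) :
    (if E then false else if I then false else Inc) = (!E && !I && Inc) := by
  cases E <;> cases I <;> simp

theorem domain_matches_py_spec : Claim_equal_domain_matches_py := by
  intro hostname included excluded _
  unfold Spec_domain_matches_py domain_matches_py domain_matches_py_alt pvHits
  simp only [any_variants_eq]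
  exact ite_eq_and _ _ _
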